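-- pv_equiv track=rewrite | github.com/z-a-f/LoA_Game | LoA_Game/LoA_CLI.py | position_to_str
-- ===== SOURCE A (Python) =====
-- def position_to_str(row, col):
--     '''Converts (row, col) to a standard chess-like notation: A1, B3, etc.'''
--     # For columns beyond 'Z', we can use a double-letter system if needed
--     # For standard LOA (8x8), only single-letter is required
--     letters = []
--     base = col
--     while True:
--         letters.append(chr(base % 26 + ord('A')))
--         base = base // 26 - 1
--         if base < 0:
--             break
--     col_str = ''.join(reversed(letters))
--     return f'{col_str}{row+1}'
-- ===== SOURCE B (Python) =====
-- def _col_letters(n):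
--     m = n // 26 - 1
--     return ('' if m < 0 else _col_letters(m)) + chr(n % 26 + ord('A'))
--
-- def position_to_str(row, col):
--     return f'{_col_letters(col)}{row + 1}'
-- ===== Notes on version B (the rewrite author's own statement) =====
-- stated objective: simpler
-- what changed: Replaced the while-loop that collects letters least-significant-first into a list and then reverses-and-joins with a recursive helper that emits the bijective base-26 letters most-significant-first via the call stack, so no list, reversal or join is needed.
import Mathlib
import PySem

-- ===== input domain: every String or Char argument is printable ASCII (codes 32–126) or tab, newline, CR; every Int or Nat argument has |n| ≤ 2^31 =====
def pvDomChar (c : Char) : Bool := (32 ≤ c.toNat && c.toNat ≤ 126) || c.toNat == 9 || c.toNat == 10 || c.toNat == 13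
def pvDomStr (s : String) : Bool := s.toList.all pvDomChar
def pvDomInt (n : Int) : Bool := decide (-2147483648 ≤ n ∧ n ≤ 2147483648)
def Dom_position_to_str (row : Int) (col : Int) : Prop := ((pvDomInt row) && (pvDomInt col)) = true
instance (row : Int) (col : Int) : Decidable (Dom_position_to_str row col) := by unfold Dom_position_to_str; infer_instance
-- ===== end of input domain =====

-- B changes the decomposition: the while-loop that appends least-significant letters and
-- reverses is replaced by a recursive helper emitting letters most-significant-first; same cost.

-- ===== PORT A =====
-- termination fact for the digit loop (cited by the ports' decreasing_by)
theorem pv_col_dec (n : Int) (h : ¬ (PySem.Int.floordiv n 26 - 1 < 0)) :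
    (PySem.Int.floordiv n 26 - 1).toNat < n.toNat := by
  have h1 : (1 : Int) ≤ PySem.Int.floordiv n 26 := by omega
  have h2 : (1 : Int) * 26 ≤ n := (PySem.Int.le_floordiv_iff_mul_le (by norm_num)).mp h1
  have h3 : PySem.Int.floordiv n 26 < n := by
    rw [PySem.Int.floordiv_lt_iff_lt_mul (by norm_num)]
    omega
  omega

-- the while-loop of A: appends a letter, updates base, breaks when base < 0
def pvLettersA (base : Int) : List Char :=
  let c := Char.ofNat (PySem.Int.mod base 26 + 65).toNat
  if h : PySem.Int.floordiv base 26 - 1 < 0 then [c]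
  else c :: pvLettersA (PySem.Int.floordiv base 26 - 1)
termination_by base.toNat
decreasing_by exact pv_col_dec base h

def position_to_str (row : Int) (col : Int) : String :=
  String.ofList (pvLettersA col).reverse ++ PySem.Int.toStr (row + 1)

-- ===== PORT B =====
-- _col_letters from Source B: recursion emits the most-significant letters first
def pvColLetters (n : Int) : String :=
  (if h : PySem.Int.floordiv n 26 - 1 < 0 then ""
   else pvColLetters (PySem.Int.floordiv n 26 - 1))
  ++ String.ofList [Char.ofNat (PySem.Int.mod n 26 + 65).toNat]
termination_by n.toNat
decreasing_by exact pv_col_dec n h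

def position_to_str_alt (row : Int) (col : Int) : String :=
  pvColLetters col ++ PySem.Int.toStr (row + 1)

-- ===== PRECONDITION & SPEC =====
def Spec_position_to_str (row : Int) (col : Int) (out : String) : Prop := out = position_to_str_alt row col
instance (row : Int) (col : Int) (out : String) : Decidable (Spec_position_to_str row col out) := by unfold Spec_position_to_str; infer_instance

-- ===== CLAIM (what is proved, stated in full; the proofs are below) =====
def Claim_equal_position_to_str : Prop := ∀ (row : Int) (col : Int), Dom_position_to_str row col → Spec_position_to_str row col (position_to_str row col)

-- ===== LEMMAS AND PROOFS =====
theorem pv_key (n : Int) : String.ofList (pvLettersA n).reverse = pvColLetters n := by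
  induction n using pvLettersA.induct with
  | case1 n h =>
      rw [pvLettersA, pvColLetters]
      simp only [dif_pos h, List.reverse_singleton, String.empty_append]
  | case2 n h ih =>
      rw [pvLettersA, pvColLetters]
      simp only [dif_neg h, List.reverse_cons, ← ih, ← String.ofList_append]

-- ===== VERDICT (by name: the statement is the Claim_ definition above) =====
theorem position_to_str_spec : Claim_equal_position_to_str := by
  intro row col _
  unfold Spec_position_to_str position_to_str position_to_str_alt
  rw [pv_key]
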